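-- pv_equiv track=rewrite | github.com/tony-sappe/advent-of-code | 2023/day_11.py | add_lines
-- ===== SOURCE A (Python) =====
-- from typing import List, Tuple
--
-- def add_lines(image: List[List[str]], extra: int) -> List[List[str]]:
--     adds = []
--     empty = []
--     for i, line in enumerate(image):
--         if set(line) == {"."}:
--             adds.append(i)
--             empty = line
--
--     for i, a in enumerate(adds):
--         for _ in range(extra):
--             image.insert(a + (i * extra), empty)
--     return image
-- ===== SOURCE B (Python) =====
-- def add_lines(image, extra):
--     # Return-value rewrite: A mutates `image` in place and returns it; B builds
--     # a fresh list in one pass (copies of the LAST all-dot row go before each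
--     # all-dot row, matching A).
--     def all_dots(line):
--         return bool(line) and all(c == "." for c in line)
--
--     empty = []
--     for line in image:
--         if all_dots(line):
--             empty = line
--
--     out = []
--     for line in image:
--         if all_dots(line):
--             out.extend([empty] * extra)
--         out.append(line)
--     return out
-- ===== Notes on version B (the rewrite author's own statement) =====
-- stated objective: simpler
-- what changed: Instead of collecting indices and repeatedly calling list.insert at computed shifted positions (a + i*extra), B finds the last all-dot row in one pass and rebuilds the output list in a single pass, extending with extra copies before each all-dot row; B also does not mutate the input list (the return value is identical).
import Mathlib
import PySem

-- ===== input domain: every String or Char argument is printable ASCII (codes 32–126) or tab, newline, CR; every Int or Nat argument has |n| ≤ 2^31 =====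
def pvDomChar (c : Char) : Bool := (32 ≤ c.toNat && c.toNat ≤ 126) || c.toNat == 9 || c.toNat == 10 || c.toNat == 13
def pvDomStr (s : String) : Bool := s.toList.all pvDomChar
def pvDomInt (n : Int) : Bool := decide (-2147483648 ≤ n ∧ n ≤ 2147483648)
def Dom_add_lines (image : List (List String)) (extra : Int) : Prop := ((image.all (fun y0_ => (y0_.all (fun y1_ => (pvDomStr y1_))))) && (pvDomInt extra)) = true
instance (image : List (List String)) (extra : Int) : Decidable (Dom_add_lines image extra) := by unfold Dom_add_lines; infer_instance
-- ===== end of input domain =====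

-- B replaces A's index-collection plus repeated list.insert by a single-pass rebuild
-- (extra copies of the last all-dot row go before each all-dot row); equivalence is about
-- the RETURN value only — A mutates `image` in place, B does not.

-- ===== PORT A =====
def add_lines (image : List (List String)) (extra : Int) : List (List String) :=
  -- first loop: collect indices of all-dot rows into `adds`, remember the row in `empty`
  let st := (PySem.List.enumerate image).foldl
    (fun (st : List Int × List String) p =>
      if PySem.Set.equal (PySem.Set.ofList p.2) (PySem.Set.ofList ["."]) then
        (st.1 ++ [p.1], p.2)
      else st) ([], [])
  -- second loop: for i, a in enumerate(adds): insert `empty` extra times at a + i*extra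
  (PySem.List.enumerate st.1).foldl
    (fun img p =>
      (PySem.List.pyRange 0 extra 1).foldl
        (fun img2 _ => PySem.List.insert img2 (p.2 + p.1 * extra) st.2) img)
    image

-- ===== PORT B =====
def allDots (line : List String) : Bool := !line.isEmpty && line.all (fun c => c == ".")

def add_lines_alt (image : List (List String)) (extra : Int) : List (List String) :=
  let empty := image.foldl (fun e line => if allDots line then line else e) []
  image.foldl (fun out line =>
    if allDots line then out ++ List.replicate extra.toNat empty ++ [line]
    else out ++ [line]) []

-- ===== PRECONDITION & SPEC =====
def Spec_add_lines (image : List (List String)) (extra : Int) (out : List (List String)) : Prop := out = add_lines_alt image extra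
instance (image : List (List String)) (extra : Int) (out : List (List String)) : Decidable (Spec_add_lines image extra out) := by unfold Spec_add_lines; infer_instance

-- ===== CLAIM (what is proved, stated in full; the proofs are below) =====
def Claim_equal_add_lines : Prop := ∀ (image : List (List String)) (extra : Int), Dom_add_lines image extra → Spec_add_lines image extra (add_lines image extra)

-- ===== LEMMAS AND PROOFS =====

-- global indices (as Int, starting at c) of the all-dot rows, in increasing order
def emptyIdxI (c : Int) : List (List String) → List Int
  | [] => []
  | y :: ys => (if allDots y then [c] else []) ++ emptyIdxI (c + 1) ys

-- the last all-dot row, starting from e0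
def lastE (xs : List (List String)) (e0 : List String) : List String :=
  xs.foldl (fun e line => if allDots line then line else e) e0

-- B's result, closed form
def expandRows (v : List String) (n : Nat) (xs : List (List String)) : List (List String) :=
  xs.flatMap (fun line => if allDots line then List.replicate n v ++ [line] else [line])

theorem cond_eq (l : List String) :
    PySem.Set.equal (PySem.Set.ofList l) (PySem.Set.ofList ["."]) = allDots l := by
  rcases Bool.eq_false_or_eq_true (allDots l) with h | h <;> rw [h]
  · rw [PySem.Set.equal_iff]
    simp only [allDots, Bool.and_eq_true, Bool.not_eq_true', List.isEmpty_eq_false_iff,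
      List.all_eq_true, beq_iff_eq] at h
    intro x
    simp only [PySem.Set.mem_ofList, List.mem_singleton]
    constructor
    · exact fun hx => h.2 x hx
    · rintro rfl
      rcases List.exists_mem_of_ne_nil l h.1 with ⟨y, hy⟩
      have := h.2 y hy; subst this; exact hy
  · rw [← Bool.not_eq_true, PySem.Set.equal_iff]
    simp only [allDots, Bool.and_eq_false_iff, Bool.not_eq_false', List.isEmpty_iff,
      List.all_eq_false, beq_iff_eq] at h
    intro hall
    rcases h with h | ⟨x, hx, hne⟩
    · have := (hall ".").mpr (by simp [PySem.Set.mem_ofList])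
      simp [h] at this
    · have := (hall x).mp (by simp [PySem.Set.mem_ofList, hx])
      simp [PySem.Set.mem_ofList] at this
      exact hne this

theorem phase1 (xs : List (List String)) (s : Int) (acc : List Int) (e0 : List String) :
    (PySem.List.enumerate xs s).foldl
      (fun (st : List Int × List String) p =>
        if PySem.Set.equal (PySem.Set.ofList p.2) (PySem.Set.ofList ["."]) then
          (st.1 ++ [p.1], p.2)
        else st) (acc, e0)
    = (acc ++ emptyIdxI s xs, lastE xs e0) := by
  induction xs generalizing s acc e0 with
  | nil => simp [PySem.List.enumerate_nil, emptyIdxI, lastE]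
  | cons y ys ih =>
    rw [PySem.List.enumerate_cons, List.foldl_cons]
    show List.foldl _ (if PySem.Set.equal (PySem.Set.ofList y) (PySem.Set.ofList ["."]) then
          (acc ++ [s], y) else (acc, e0)) _ = _
    rw [cond_eq]
    by_cases hy : allDots y = true
    · rw [if_pos hy, ih, Prod.mk.injEq]
      refine ⟨?_, ?_⟩
      · rw [show emptyIdxI s (y :: ys) = s :: emptyIdxI (s + 1) ys by simp [emptyIdxI, hy],
            List.append_assoc, List.singleton_append]
      · simp only [lastE, List.foldl_cons]
        rw [if_pos hy]
    · rw [if_neg hy, ih, Prod.mk.injEq]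
      refine ⟨?_, ?_⟩
      · rw [show emptyIdxI s (y :: ys) = emptyIdxI (s + 1) ys by simp [emptyIdxI, hy]]
      · simp only [lastE, List.foldl_cons]
        rw [if_neg hy]

theorem foldl_const_fun {α β : Type} (f : α → α) (l : List β) (init : α) :
    l.foldl (fun a _ => f a) init = f^[l.length] init := by
  induction l generalizing init with
  | nil => rfl
  | cons x xs ih => simp [List.foldl_cons, ih, Function.iterate_succ_apply]

theorem insert_iter (n : Nat) (P L : List (List String)) (v : List String) :
    (fun M => PySem.List.insert M (P.length : Int) v)^[n] (P ++ L)
      = P ++ List.replicate n v ++ L := by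
  induction n generalizing L with
  | zero => simp
  | succ n ih =>
    rw [Function.iterate_succ_apply]
    have h1 : PySem.List.insert (P ++ L) ((P.length : Nat) : Int) v = P ++ (v :: L) := by
      rw [PySem.List.insert_natCast _ _ _ (by simp)]
      simp
    rw [h1, ih]
    simp [List.replicate_succ']

theorem insertN_at_len (extra : Int) (P L : List (List String)) (v : List String) :
    (PySem.List.pyRange 0 extra 1).foldl
      (fun img2 _ => PySem.List.insert img2 (P.length : Int) v) (P ++ L)
      = P ++ List.replicate extra.toNat v ++ L := by
  rw [foldl_const_fun, PySem.List.length_pyRange_one]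
  have h0 : (extra - 0).toNat = extra.toNat := by omega
  rw [h0, insert_iter]

theorem foldl_expand (v : List String) (n : Nat) :
    ∀ (xs : List (List String)) (acc : List (List String)),
    xs.foldl (fun out line =>
      if allDots line then out ++ List.replicate n v ++ [line] else out ++ [line]) acc
      = acc ++ expandRows v n xs := by
  intro xs
  induction xs with
  | nil => intro acc; simp [expandRows]
  | cons y ys ih =>
    intro acc
    simp only [List.foldl_cons]
    by_cases hy : allDots y = true
    · rw [if_pos hy, ih]
      simp [expandRows, List.flatMap_cons, hy]
    · rw [if_neg hy, ih]
      simp [expandRows, List.flatMap_cons, hy]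

theorem phase2 (extra : Int) (hpos : 0 < extra) (v : List String) :
    ∀ (ys P : List (List String)) (c i0 : Int),
    (P.length : Int) = c + i0 * extra →
    (PySem.List.enumerate (emptyIdxI c ys) i0).foldl
      (fun img p =>
        (PySem.List.pyRange 0 extra 1).foldl
          (fun img2 _ => PySem.List.insert img2 (p.2 + p.1 * extra) v) img)
      (P ++ ys)
    = P ++ expandRows v extra.toNat ys := by
  intro ys
  induction ys with
  | nil => intro P c i0 h; simp [emptyIdxI, PySem.List.enumerate_nil, expandRows]
  | cons y ys ih =>
    intro P c i0 h
    have hext : ((extra.toNat : Nat) : Int) = extra := Int.toNat_of_nonneg hpos.le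
    by_cases hy : allDots y = true
    · rw [show emptyIdxI c (y :: ys) = c :: emptyIdxI (c + 1) ys by simp [emptyIdxI, hy],
          PySem.List.enumerate_cons, List.foldl_cons]
      show List.foldl _
        ((PySem.List.pyRange 0 extra 1).foldl
          (fun img2 _ => PySem.List.insert img2 (c + i0 * extra) v)
          (P ++ (y :: ys))) _ = _
      have hc : c + i0 * extra = ((P.length : Nat) : Int) := by rw [h]
      rw [hc, insertN_at_len]
      have hP' : ((P ++ List.replicate extra.toNat v ++ [y]).length : Int)
          = (c + 1) + (i0 + 1) * extra := by
        simp only [List.length_append, List.length_replicate, List.length_cons,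
          List.length_nil]
        push_cast
        rw [h, hext]
        ring
      rw [show P ++ List.replicate extra.toNat v ++ y :: ys
            = (P ++ List.replicate extra.toNat v ++ [y]) ++ ys by simp,
          ih (P ++ List.replicate extra.toNat v ++ [y]) (c + 1) (i0 + 1) hP']
      simp [expandRows, List.flatMap_cons, hy]
    · rw [show emptyIdxI c (y :: ys) = emptyIdxI (c + 1) ys by simp [emptyIdxI, hy]]
      have hP' : ((P ++ [y]).length : Int) = (c + 1) + i0 * extra := by
        simp only [List.length_append, List.length_cons, List.length_nil]
        push_cast
        rw [h]
        ring
      rw [show P ++ y :: ys = (P ++ [y]) ++ ys by simp,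
          ih (P ++ [y]) (c + 1) i0 hP']
      simp [expandRows, List.flatMap_cons, hy]

theorem alt_eq_expand (image : List (List String)) (extra : Int) :
    add_lines_alt image extra = expandRows (lastE image []) extra.toNat image := by
  simpa [add_lines_alt, lastE] using foldl_expand (lastE image []) extra.toNat image []

theorem expand_zero (v : List String) (xs : List (List String)) :
    expandRows v 0 xs = xs := by
  induction xs with
  | nil => rfl
  | cons y ys ih =>
    simp only [expandRows, List.flatMap_cons, List.replicate_zero, List.nil_append,
      ite_self, List.singleton_append] at ih ⊢
    exact congrArg (y :: ·) ih

-- ===== VERDICT (by name: the statement is the Claim_ definition above) =====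
theorem add_lines_spec : Claim_equal_add_lines := by
  intro image extra _
  unfold Spec_add_lines
  rw [alt_eq_expand]
  unfold add_lines
  rw [phase1 image 0 [] []]
  simp only [List.nil_append]
  by_cases hpos : 0 < extra
  · simpa using phase2 extra hpos (lastE image []) image [] 0 0 (by simp)
  · have hle : extra ≤ 0 := by omega
    simp only [PySem.List.pyRange_one_eq_nil hle, List.foldl_nil]
    rw [PySem.List.foldl_ignore]
    rw [Int.toNat_of_nonpos hle, expand_zero]
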